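-- pv_equiv track=rewrite | github.com/bobrovsky420/my-dev-team | src/devteam/utils/project_spec.py | parse_spec_from_string
-- ===== SOURCE A (Python) =====
-- def parse_spec_from_string(content: str) -> tuple[str, str]:
--     name = "New Project"
--     lines = content.split('\n')
--     spec_start = 0
--     for idx, line in enumerate(lines):
--         if not line.strip():
--             spec_start = idx + 1
--             break
--         if line.startswith('Subject:') and 'NEW PROJECT:' in line:
--             extracted_name = line.split('NEW PROJECT:', 1)[-1].strip()
--             if extracted_name:
--                 name = extracted_name
--     spec_content = '\n'.join(lines[spec_start:]).strip()
--     return name, spec_content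
-- ===== SOURCE B (Python) =====
-- def parse_spec_from_string(content: str) -> tuple[str, str]:
--     lines = content.split('\n')
--     flags = [bool(l.strip()) for l in lines]
--     try:
--         sep = flags.index(False)
--         header, body = lines[:sep], lines[sep + 1:]
--     except ValueError:
--         header, body = lines, lines
--     name = next((n for n in (l.split('NEW PROJECT:', 1)[-1].strip()
--                              for l in reversed(header)
--                              if l.startswith('Subject:') and 'NEW PROJECT:' in l)
--                  if n), "New Project")
--     return name, '\n'.join(body).strip()
-- ===== Notes on version B (the rewrite author's own statement) =====
-- stated objective: alternative
-- what changed: B finds the separator by indexing a precomputed boolean-flag list (flags.index(False)) and then determines the name by scanning the header lines BACKWARDS with an early-exit next(), taking the first valid extraction from the end, instead of A's forward break-loop that interleaves separator detection with overwriting the name on every match.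
import Mathlib
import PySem

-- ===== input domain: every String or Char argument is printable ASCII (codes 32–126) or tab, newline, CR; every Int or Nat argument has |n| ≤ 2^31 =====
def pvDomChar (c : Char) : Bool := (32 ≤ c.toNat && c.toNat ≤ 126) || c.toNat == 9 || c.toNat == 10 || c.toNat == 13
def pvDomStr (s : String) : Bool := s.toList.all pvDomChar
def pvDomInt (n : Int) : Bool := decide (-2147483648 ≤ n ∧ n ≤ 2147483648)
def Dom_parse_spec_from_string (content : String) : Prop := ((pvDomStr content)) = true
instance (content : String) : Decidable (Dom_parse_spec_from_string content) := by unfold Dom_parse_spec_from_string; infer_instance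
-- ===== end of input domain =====

-- B replaces A's forward break-loop (which interleaves separator detection with repeatedly
-- overwriting the name) by an index lookup on a boolean-flag list for the separator and a
-- BACKWARDS early-exit scan of the header for the name (objective: alternative; same cost).

-- ===== PORT A =====

-- 'line.startswith('Subject:') and 'NEW PROJECT:' in line' (textually the same test in A and B)
def pvMatch (l : List Char) : Bool :=
  PySem.Chars.startswith l "Subject:".toList && PySem.Chars.isIn "NEW PROJECT:".toList l

-- line.split('NEW PROJECT:', 1)[-1].strip()  (textually the same expression in A and B)
def pvExtract (l : List Char) : List Char :=
  PySem.Chars.strip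
    (PySem.List.pyGetD (PySem.Chars.splitOnMax l "NEW PROJECT:".toList 1) (-1) [])

-- A's for-loop over enumerate(lines) with break: returns (name, spec_start)
def pvLoopA : List (List Char) → Nat → List Char → List Char × Nat
  | [], _, name => (name, 0)                 -- no break: spec_start keeps its initial 0
  | l :: rest, idx, name =>
    if (PySem.Chars.strip l).isEmpty then (name, idx + 1)   -- 'if not line.strip(): break'
    else
      pvLoopA rest (idx + 1)
        (if pvMatch l then (if (pvExtract l).isEmpty then name else pvExtract l) else name)

def parse_spec_from_string (content : String) : String × String :=
  let lines := PySem.Chars.splitOn content.toList "\n".toList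
  let r := pvLoopA lines 0 "New Project".toList
  -- '\n'.join(lines[spec_start:]).strip(); spec_start = r.2 is a Nat so the slice is a drop
  (String.ofList r.1,
   String.ofList (PySem.Chars.strip (PySem.Chars.join "\n".toList (lines.drop r.2))))

-- ===== PORT B =====

-- the filter of B's generator: matching line whose extraction is non-empty
def pvGoodB (l : List Char) : Bool := pvMatch l && !(pvExtract l).isEmpty

def parse_spec_from_string_alt (content : String) : String × String :=
  let lines := PySem.Chars.splitOn content.toList "\n".toList
  -- flags = [bool(l.strip()) for l in lines]
  let flags := lines.map (fun l => !(PySem.Chars.strip l).isEmpty)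
  -- try: sep = flags.index(False); header, body = lines[:sep], lines[sep+1:]
  -- except ValueError: header, body = lines, lines
  let hb :=
    match PySem.List.index? flags false with
    | some sep => (lines.take sep, lines.drop (sep + 1))
    | none => (lines, lines)
  -- name = next((n for n in (extract(l) for l in reversed(header) if match(l)) if n), default)
  let name :=
    match hb.1.reverse.find? pvGoodB with
    | some l => pvExtract l
    | none => "New Project".toList
  (String.ofList name,
   String.ofList (PySem.Chars.strip (PySem.Chars.join "\n".toList hb.2)))

-- ===== PRECONDITION & SPEC =====
def Spec_parse_spec_from_string (content : String) (out : String × String) : Prop := out = parse_spec_from_string_alt content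
instance (content : String) (out : String × String) : Decidable (Spec_parse_spec_from_string content out) := by unfold Spec_parse_spec_from_string; infer_instance

-- ===== CLAIM (what is proved, stated in full; the proofs are below) =====
def Claim_equal_parse_spec_from_string : Prop := ∀ (content : String), Dom_parse_spec_from_string content → Spec_parse_spec_from_string content (parse_spec_from_string content)

-- ===== LEMMAS AND PROOFS =====

-- A's step function, as folded by pvLoopA before the break
def pvStepA (name l : List Char) : List Char :=
  if pvMatch l then (if (pvExtract l).isEmpty then name else pvExtract l) else name

-- A's break-driven loop, characterised by the position of the first blank line
theorem pvLoopA_eq (ls : List (List Char)) (idx : Nat) (name : List Char) :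
    pvLoopA ls idx name =
      match ls.findIdx? (fun l => (PySem.Chars.strip l).isEmpty) with
      | none   => (ls.foldl pvStepA name, 0)
      | some i => ((ls.take i).foldl pvStepA name, idx + i + 1) := by
  induction ls generalizing idx name with
  | nil => simp [pvLoopA]
  | cons l rest ih =>
    by_cases h : (PySem.Chars.strip l).isEmpty
    · simp [pvLoopA, h, List.findIdx?_cons]
    · simp only [pvLoopA, h, Bool.false_eq_true, if_false, List.findIdx?_cons, ih]
      cases hf : rest.findIdx? (fun l => (PySem.Chars.strip l).isEmpty) <;>
        (simp [List.foldl_cons, pvStepA]; try omega)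

-- the forward 'keep the last valid extraction' fold equals the backwards first-match search
theorem foldA_eq_revFind (ls : List (List Char)) (name : List Char) :
    ls.foldl pvStepA name =
      match ls.reverse.find? pvGoodB with
      | some l => pvExtract l
      | none => name := by
  induction ls using List.reverseRecOn generalizing name with
  | nil => simp
  | append_singleton ls l ih =>
    rw [List.foldl_append]
    by_cases hg : pvGoodB l
    · have hm : pvMatch l = true := by
        simp [pvGoodB] at hg; exact hg.1
      have he : (pvExtract l).isEmpty = false := by
        simp [pvGoodB] at hg; simp [hg.2]
      simp [List.foldl_cons, pvStepA, hm, he, hg]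
    · have hid : ∀ X, pvStepA X l = X := by
        intro X
        simp [pvGoodB] at hg
        by_cases hm : pvMatch l
        · simp [pvStepA, hm, hg hm]
        · simp [pvStepA, hm]
      simp only [List.reverse_append, List.reverse_cons, List.reverse_nil, List.nil_append,
        List.singleton_append, List.find?_cons, hg, ih]
      cases ls.reverse.find? pvGoodB <;> simp [hid]

-- B's flags.index(False) is the index of the first blank line
theorem index_flags_eq (ls : List (List Char)) :
    PySem.List.index? (ls.map (fun l => !(PySem.Chars.strip l).isEmpty)) false =
      ls.findIdx? (fun l => (PySem.Chars.strip l).isEmpty) := by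
  induction ls with
  | nil => simp [PySem.List.index?_eq_idxOf?, List.idxOf?]
  | cons l rest ih =>
    by_cases h : (PySem.Chars.strip l).isEmpty
    · simp [List.map_cons, h, List.idxOf?, List.findIdx?_cons]
    · rw [List.map_cons, List.findIdx?_cons,
        PySem.List.index?_cons_of_ne _ (by simp [h] : (!(PySem.Chars.strip l).isEmpty) ≠ false), ih]
      simp [h]

-- ===== VERDICT (by name: the statement is the Claim_ definition above) =====
theorem parse_spec_from_string_spec : Claim_equal_parse_spec_from_string := by
  intro content _
  unfold Spec_parse_spec_from_string parse_spec_from_string parse_spec_from_string_alt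
  simp only [pvLoopA_eq, index_flags_eq, foldA_eq_revFind]
  cases hf : (PySem.Chars.splitOn content.toList "\n".toList).findIdx?
      (fun l => (PySem.Chars.strip l).isEmpty) <;> simp
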